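-- pv_equiv track=rewrite | github.com/youngcubingprogramer/jiaweiPython | 2048/2048.py | sum_of_every_2_number
-- ===== SOURCE A (Python) =====
-- def sum_of_every_2_number(nozerolist):
--     if(len(nozerolist)==0):
--         return []
--     elif(len(nozerolist)==1):
--         return nozerolist
--     elif(len(nozerolist)==2):
--         if (nozerolist[0] == nozerolist[1]):
--             return [nozerolist[0]+nozerolist[0]]
--         else:
--             return nozerolist
--     if(len(nozerolist)>2):
--         if(nozerolist[0]==nozerolist[1]):
--             nozerolist[0] = nozerolist[0] +nozerolist[0]
--             return [nozerolist[0]] + sum_of_every_2_number(nozerolist[2:])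
--         else:
--             return [nozerolist[0]] + sum_of_every_2_number(nozerolist[1:])
-- ===== SOURCE B (Python) =====
-- def sum_of_every_2_number(nozerolist):
--     res = []
--     i = 0
--     n = len(nozerolist)
--     while i < n:
--         x = nozerolist[i]
--         if i + 1 < n and nozerolist[i + 1] == x:
--             res.append(x + x)
--             i += 2
--         else:
--             res.append(x)
--             i += 1
--     return res
-- ===== Notes on version B (the rewrite author's own statement) =====
-- stated objective: faster
-- what changed: Replaced A's recursion that rebuilds list slices and concatenates ([x]+rec(rest)) at every step with a single index-driven while loop appending to one result list.
import Mathlib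
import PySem

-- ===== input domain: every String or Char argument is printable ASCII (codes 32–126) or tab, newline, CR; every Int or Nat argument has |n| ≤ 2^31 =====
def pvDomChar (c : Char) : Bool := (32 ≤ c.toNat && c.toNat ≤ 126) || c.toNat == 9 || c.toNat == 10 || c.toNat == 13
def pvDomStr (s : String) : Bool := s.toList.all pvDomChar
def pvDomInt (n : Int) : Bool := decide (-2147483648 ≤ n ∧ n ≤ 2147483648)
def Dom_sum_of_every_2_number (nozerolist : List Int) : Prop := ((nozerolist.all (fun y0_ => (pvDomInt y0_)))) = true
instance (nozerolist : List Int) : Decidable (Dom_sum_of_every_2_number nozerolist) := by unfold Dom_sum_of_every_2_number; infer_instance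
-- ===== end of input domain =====

-- B replaces A's slice-and-concatenate recursion with one linear index loop appending to an
-- accumulator (objective: faster). Return-value equivalence only: Python A mutates
-- nozerolist[0] in place when len > 2 and the first two elements are equal; B never mutates.

-- ===== PORT A =====
-- A's recursion: length-0/1/2 base cases, then merge the first pair or keep the head.
def sum_of_every_2_number : List Int → List Int
  | [] => []
  | [a] => [a]
  | [a, b] => if a = b then [a + a] else [a, b]
  | a :: b :: c :: rest =>
      if a = b then (a + a) :: sum_of_every_2_number (c :: rest)
      else a :: sum_of_every_2_number (b :: c :: rest)

-- ===== PORT B =====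
-- B's while loop: index i scans the list once, appending to res (kept reversed, reversed at exit).
def sumAltLoop (xs : List Int) (i : Nat) (res : List Int) : List Int :=
  if h : i < xs.length then
    if h2 : xs[i + 1]? = some xs[i] then
      sumAltLoop xs (i + 2) ((xs[i] + xs[i]) :: res)
    else
      sumAltLoop xs (i + 1) (xs[i] :: res)
  else res.reverse
termination_by xs.length - i

def sum_of_every_2_number_alt (nozerolist : List Int) : List Int :=
  sumAltLoop nozerolist 0 []

-- ===== PRECONDITION & SPEC =====
def Spec_sum_of_every_2_number (nozerolist : List Int) (out : List Int) : Prop := out = sum_of_every_2_number_alt nozerolist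
instance (nozerolist : List Int) (out : List Int) : Decidable (Spec_sum_of_every_2_number nozerolist out) := by unfold Spec_sum_of_every_2_number; infer_instance

-- ===== CLAIM (what is proved, stated in full; the proofs are below) =====
def Claim_equal_sum_of_every_2_number : Prop := ∀ (nozerolist : List Int), Dom_sum_of_every_2_number nozerolist → Spec_sum_of_every_2_number nozerolist (sum_of_every_2_number nozerolist)

-- ===== LEMMAS AND PROOFS =====

-- A's recursion satisfies the uniform two-element unfolding (also when the tail is empty).
lemma sumA_cons_cons (a b : Int) (t : List Int) :
    sum_of_every_2_number (a :: b :: t) =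
      if a = b then (a + a) :: sum_of_every_2_number t
      else a :: sum_of_every_2_number (b :: t) := by
  cases t with
  | nil => by_cases h : a = b <;> simp [sum_of_every_2_number, h]
  | cons c rest => rfl

-- Loop invariant: the loop's result is the reversed accumulator followed by A on the unscanned suffix.
lemma sumAltLoop_eq : ∀ (xs : List Int) (i : Nat) (res : List Int),
    sumAltLoop xs i res = res.reverse ++ sum_of_every_2_number (xs.drop i)
  | xs, i, res => by
    rw [sumAltLoop]
    split
    · next h =>
      have hdrop : xs.drop i = xs[i] :: xs.drop (i + 1) := List.drop_eq_getElem_cons h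
      split
      · next h2 =>
        have h2a : i + 1 < xs.length := by
          rcases List.getElem?_eq_some_iff.mp h2 with ⟨hlt, _⟩; exact hlt
        have h2b : xs[i + 1] = xs[i] := by
          rcases List.getElem?_eq_some_iff.mp h2 with ⟨hlt, hv⟩; exact hv
        have hdrop2 : xs.drop (i + 1) = xs[i + 1] :: xs.drop (i + 2) :=
          List.drop_eq_getElem_cons h2a
        rw [sumAltLoop_eq xs (i + 2) _, hdrop, hdrop2, sumA_cons_cons]
        simp [h2b]
      · next h2 =>
        rw [sumAltLoop_eq xs (i + 1) _, hdrop]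
        by_cases hlt : i + 1 < xs.length
        · have hdrop2 : xs.drop (i + 1) = xs[i + 1] :: xs.drop (i + 2) :=
            List.drop_eq_getElem_cons hlt
          have hne : xs[i] ≠ xs[i + 1] := by
            intro he
            exact h2 (List.getElem?_eq_some_iff.mpr ⟨hlt, he.symm⟩)
          rw [hdrop2, sumA_cons_cons]
          simp [hne]
        · have : xs.drop (i + 1) = [] := List.drop_eq_nil_of_le (by omega)
          rw [this]
          simp [sum_of_every_2_number]
    · next h =>
      have : xs.drop i = [] := List.drop_eq_nil_of_le (by omega)
      simp [this, sum_of_every_2_number]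
termination_by xs i _ => xs.length - i

-- ===== VERDICT (by name: the statement is the Claim_ definition above) =====
theorem sum_of_every_2_number_spec : Claim_equal_sum_of_every_2_number := by
  intro xs _
  unfold Spec_sum_of_every_2_number sum_of_every_2_number_alt
  rw [sumAltLoop_eq]
  simp
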